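-- pv_equiv track=rewrite | github.com/AzerSD/CodingGame | puzzles-easy/object insertion.py | count_fits
-- ===== SOURCE A (Python) =====
-- def count_fits(object_lines, grid_lines):
--     grid_height = len(grid_lines)
--     grid_width = len(grid_lines[0])
--
--     object_height = len(object_lines)
--     object_width = len(object_lines[0])
--
--     fit_count = 0
--     for i in range(grid_height - object_height + 1):
--         for j in range(grid_width - object_width + 1):
--             fits = True
--             for k in range(object_height):
--                 for l in range(object_width):
--                     if grid_lines[i + k][j + l] != "." and object_lines[k][l] != ".":
--                         fits = False
--                         break
--                 if not fits:
--                     break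
--             if fits:
--                 fit_count += 1
--
--     return fit_count
-- ===== SOURCE B (Python) =====
-- def count_fits(object_lines, grid_lines):
--     gh = len(grid_lines)
--     gw = len(grid_lines[0])
--     oh = len(object_lines)
--     ow = len(object_lines[0])
--
--     def row_bits(row, width):
--         bits = 0
--         for ch in reversed(row[:width]):
--             bits = 2 * bits + (0 if ch == '.' else 1)
--         return bits
--
--     gbits = [row_bits(r, gw) for r in grid_lines]
--     obits = [row_bits(r, ow) for r in object_lines]
--
--     count = 0
--     for i in range(gh - oh + 1):
--         for j in range(gw - ow + 1):
--             if all((gbits[i + k] >> j) & obits[k] == 0 for k in range(oh)):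
--                 count += 1
--     return count
-- ===== Notes on version B (the rewrite author's own statement) =====
-- stated objective: alternative
-- what changed: B packs each row into an integer bitmask of blocked cells once, and tests a placement with one shift-AND word operation per object row instead of A's per-cell double inner loop with breaks; Pre_ excludes ragged/empty inputs where A can raise IndexError (on the excluded ragged inputs where a collision break lets A return, B agrees anyway).
-- outside the precondition, e.g. on count_fits(['ab'], ['.y', 'z']): A returns 0, B returns 0
import Mathlib
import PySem

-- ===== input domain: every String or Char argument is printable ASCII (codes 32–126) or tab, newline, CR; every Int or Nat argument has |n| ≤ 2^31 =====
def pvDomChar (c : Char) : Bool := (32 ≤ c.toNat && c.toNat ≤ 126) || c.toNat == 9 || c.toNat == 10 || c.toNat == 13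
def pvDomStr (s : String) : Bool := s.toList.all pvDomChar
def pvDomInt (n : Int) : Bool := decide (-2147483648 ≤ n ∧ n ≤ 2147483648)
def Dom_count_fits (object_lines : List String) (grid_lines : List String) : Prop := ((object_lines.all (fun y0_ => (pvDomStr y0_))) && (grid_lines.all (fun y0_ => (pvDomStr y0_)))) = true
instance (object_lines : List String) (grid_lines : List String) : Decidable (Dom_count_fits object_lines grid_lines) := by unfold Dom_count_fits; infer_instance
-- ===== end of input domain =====

-- B replaces A's per-cell inner double loop by per-row integer bitmasks tested with one
-- shift-AND word operation per object row (alternative algorithm; not measured faster).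

-- ===== PORT A =====
-- Literal port of A. grid_lines[i+k][j+l] etc. are in range on every access A actually
-- performs inside Pre_; the '.' defaults are never reached there.
def count_fits (object_lines : List String) (grid_lines : List String) : Int :=
  let grid_height := grid_lines.length
  let grid_width := ((grid_lines.getD 0 "").toList).length
  let object_height := object_lines.length
  let object_width := ((object_lines.getD 0 "").toList).length
  (List.range (grid_height + 1 - object_height)).foldl (fun fit_count i =>
    (List.range (grid_width + 1 - object_width)).foldl (fun fit_count j =>
      -- 'fits' flag with the two breaks = all cells pass
      let fits := (List.range object_height).all (fun k =>
        (List.range object_width).all (fun l =>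
          !((((grid_lines.getD (i + k) "").toList.getD (j + l) '.') != '.')
            && (((object_lines.getD k "").toList.getD l '.') != '.'))))
      if fits then fit_count + 1 else fit_count) fit_count) 0

-- ===== PORT B =====
-- row_bits: bit l of the result is set iff the l-th of the first `width` chars is not '.'.
def pvRowBits (cs : List Char) : Nat :=
  cs.foldr (fun ch bits => 2 * bits + (if ch == '.' then 0 else 1)) 0

def count_fits_alt (object_lines : List String) (grid_lines : List String) : Int :=
  let gh := grid_lines.length
  let gw := ((grid_lines.getD 0 "").toList).length
  let oh := object_lines.length
  let ow := ((object_lines.getD 0 "").toList).length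
  let gbits := grid_lines.map (fun r => pvRowBits (r.toList.take gw))
  let obits := object_lines.map (fun r => pvRowBits (r.toList.take ow))
  (List.range (gh + 1 - oh)).foldl (fun count i =>
    (List.range (gw + 1 - ow)).foldl (fun count j =>
      if (List.range oh).all (fun k =>
          ((gbits.getD (i + k) 0) >>> j) &&& (obits.getD k 0) == 0)
      then count + 1 else count) count) 0

-- ===== PRECONDITION & SPEC =====
-- Pre_ admits the inputs on which A provably raises no IndexError: non-empty lists and one of
-- three declarative no-raise classes: (1) the object is rectangle-covered (every object row at
-- least as long as the first) and either there is no placement (object taller/wider than the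
-- grid, or width 0) or the grid is rectangle-covered too; (2) the grid is dot-free and the
-- object's first cell is blocked, so every placement breaks on its first read (which is in
-- range); (3) every grid cell is '.', so the object rows are never inspected.  Pre_ still
-- excludes ragged inputs where A returns only because a mid-scan collision break happens to
-- avoid the out-of-range access (not expressible in closed form); B agrees with A there anyway.
def Pre_count_fits (object_lines : List String) (grid_lines : List String) : Prop :=
  object_lines ≠ [] ∧ grid_lines ≠ [] ∧
  (((∀ s ∈ object_lines, ((object_lines.getD 0 "").toList).length ≤ s.toList.length) ∧
      (((object_lines.getD 0 "").toList).length = 0 ∨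
       grid_lines.length < object_lines.length ∨
       ((grid_lines.getD 0 "").toList).length < ((object_lines.getD 0 "").toList).length ∨
       (∀ s ∈ grid_lines, ((grid_lines.getD 0 "").toList).length ≤ s.toList.length)))
   ∨ (1 ≤ ((object_lines.getD 0 "").toList).length ∧
      (object_lines.getD 0 "").toList.getD 0 '.' ≠ '.' ∧
      (∀ s ∈ grid_lines, '.' ∉ s.toList) ∧
      (∀ s ∈ grid_lines,
        ((grid_lines.getD 0 "").toList).length + 1 - ((object_lines.getD 0 "").toList).length
          ≤ s.toList.length))
   ∨ ((∀ s ∈ grid_lines, ∀ c ∈ s.toList, c = '.') ∧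
      (∀ s ∈ grid_lines, ((grid_lines.getD 0 "").toList).length ≤ s.toList.length)))
instance (object_lines : List String) (grid_lines : List String) : Decidable (Pre_count_fits object_lines grid_lines) := by unfold Pre_count_fits; infer_instance

def pvWitness_count_fits : List String × List String := (["x."], ["..", ".x"])

def Spec_count_fits (object_lines : List String) (grid_lines : List String) (out : Int) : Prop := out = count_fits_alt object_lines grid_lines
instance (object_lines : List String) (grid_lines : List String) (out : Int) : Decidable (Spec_count_fits object_lines grid_lines out) := by unfold Spec_count_fits; infer_instance

-- ===== CLAIM (what is proved, stated in full; the proofs are below) =====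
def Claim_equal_count_fits : Prop := ∀ (object_lines : List String) (grid_lines : List String), Dom_count_fits object_lines grid_lines → Pre_count_fits object_lines grid_lines → Spec_count_fits object_lines grid_lines (count_fits object_lines grid_lines)

-- ===== LEMMAS AND PROOFS =====

theorem pvRowBits_testBit (cs : List Char) (t : Nat) :
    (pvRowBits cs).testBit t = !(cs.getD t '.' == '.') := by
  induction cs generalizing t with
  | nil => simp [pvRowBits, List.getD]
  | cons c cs ih =>
    have hstep : pvRowBits (c :: cs) = 2 * pvRowBits cs + (if c == '.' then 0 else 1) := rfl
    cases t with
    | zero =>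
      rw [hstep, Nat.testBit_zero]
      by_cases h : c == '.' <;> simp [h, List.getD]
    | succ t =>
      rw [hstep, Nat.testBit_succ]
      have h2 : (2 * pvRowBits cs + (if c == '.' then 0 else 1)) / 2 = pvRowBits cs := by
        split <;> omega
      rw [h2, ih]
      simp [List.getD]

theorem pvRowBits_lt (cs : List Char) : pvRowBits cs < 2 ^ cs.length := by
  induction cs with
  | nil => simp [pvRowBits]
  | cons c cs ih =>
    have hstep : pvRowBits (c :: cs) = 2 * pvRowBits cs + (if c == '.' then 0 else 1) := rfl
    have hpow : 2 ^ (c :: cs).length = 2 ^ cs.length * 2 := by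
      simp [List.length_cons, pow_succ]
    rw [hstep, hpow]
    split <;> omega

theorem pv_and_eq_zero (x y : Nat) :
    (x &&& y = 0) ↔ ∀ t, ¬(x.testBit t = true ∧ y.testBit t = true) := by
  constructor
  · intro h t hc
    have := congrArg (fun n => n.testBit t) h
    simp [Nat.testBit_and, Nat.zero_testBit, hc.1, hc.2] at this
  · intro h
    apply Nat.eq_of_testBit_eq
    intro t
    rw [Nat.testBit_and, Nat.zero_testBit]
    have := h t
    cases hx : x.testBit t <;> cases hy : y.testBit t <;> simp_all

-- getD through map, with matching defaults
theorem pv_getD_map_rowBits (xs : List String) (w r : Nat) :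
    (xs.map (fun s => pvRowBits (s.toList.take w))).getD r 0
      = pvRowBits ((xs.getD r "").toList.take w) := by
  induction xs generalizing r with
  | nil => simp [List.getD, pvRowBits]
  | cons x xs ih =>
    cases r with
    | zero => simp [List.getD]
    | succ r => simpa [List.getD] using ih r

theorem pv_getD_take (cs : List Char) (n t : Nat) (ht : t < n) :
    (cs.take n).getD t '.' = cs.getD t '.' := by
  induction cs generalizing n t with
  | nil => simp
  | cons c cs ih =>
    cases n with
    | zero => omega
    | succ n =>
      cases t with
      | zero => simp [List.getD]
      | succ t => simpa [List.getD] using ih n t (by omega)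

-- The heart: for a legal column j, one shift-AND row test equals A's inner scan of that row.
theorem pv_shift_and_zero (x y j : Nat) :
    ((x >>> j) &&& y = 0) ↔ ∀ t, ¬(x.testBit (j + t) = true ∧ y.testBit t = true) := by
  rw [pv_and_eq_zero]
  constructor <;> intro h t <;> simpa [Nat.testBit_shiftRight] using h t

theorem pv_all_congr_mem {α : Type} (l : List α) (p q : α → Bool)
    (h : ∀ x ∈ l, p x = q x) : l.all p = l.all q := by
  induction l with
  | nil => rfl
  | cons a l ih =>
    simp only [List.all_cons, h a (by simp), ih (fun x hx => h x (by simp [hx]))]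

theorem pv_row_eq (orow grow : List Char) (ow gw j : Nat)
    (hw : ow ≤ orow.length) (hj : j + ow ≤ gw) :
    (((pvRowBits (grow.take gw)) >>> j) &&& pvRowBits (orow.take ow) == 0)
      = (List.range ow).all (fun l =>
          !((grow.getD (j + l) '.' != '.') && (orow.getD l '.' != '.'))) := by
  rw [Bool.eq_iff_iff, beq_iff_eq, pv_shift_and_zero, List.all_eq_true]
  simp only [List.mem_range]
  constructor
  · intro h l hl
    have h' := h l
    rw [pvRowBits_testBit, pvRowBits_testBit,
        pv_getD_take grow gw (j + l) (by omega), pv_getD_take orow ow l hl] at h'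
    cases hg : grow.getD (j + l) '.' == '.' <;> cases ho : orow.getD l '.' == '.' <;>
      simp_all
  · intro h t
    by_cases ht : t < ow
    · have h' := h t ht
      rw [pvRowBits_testBit, pvRowBits_testBit,
          pv_getD_take grow gw (j + t) (by omega), pv_getD_take orow ow t ht]
      cases hg : grow.getD (j + t) '.' == '.' <;> cases ho : orow.getD t '.' == '.' <;>
        simp_all
      exact (h t ht).elim hg ho
    · intro hc
      have hlen : (orow.take ow).length = ow := by
        simp [List.length_take]; omega
      have hbit : (pvRowBits (orow.take ow)).testBit t = false := by
        apply Nat.testBit_lt_two_pow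
        calc pvRowBits (orow.take ow) < 2 ^ (orow.take ow).length := pvRowBits_lt _
          _ = 2 ^ ow := by rw [hlen]
          _ ≤ 2 ^ t := Nat.pow_le_pow_right (by omega) (by omega)
      rw [hbit] at hc
      exact absurd hc.2 (by simp)

theorem pv_getD_dot (cs : List Char) (t : Nat) (h : ∀ c ∈ cs, c = '.') :
    cs.getD t '.' = '.' := by
  induction cs generalizing t with
  | nil => simp [List.getD]
  | cons c cs ih =>
    cases t with
    | zero => simpa [List.getD] using h c (by simp)
    | succ t => simpa [List.getD] using ih t (fun x hx => h x (by simp [hx]))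

theorem pv_getD_mem_ne (cs : List Char) (t : Nat) (ht : t < cs.length) (h : '.' ∉ cs) :
    cs.getD t '.' ≠ '.' := by
  rw [List.getD_eq_getElem?_getD, List.getElem?_eq_getElem ht]
  intro hc
  exact h (hc ▸ List.getElem_mem ht)

-- the per-placement condition of A equals that of B, under any of Pre_'s three classes
theorem pv_cond_eq (object_lines grid_lines : List String) (i j : Nat)
    (ho : object_lines ≠ []) (_hg : grid_lines ≠ [])
    (hi : i < grid_lines.length + 1 - object_lines.length)
    (hj : j < (grid_lines.getD 0 "").toList.length + 1 - (object_lines.getD 0 "").toList.length)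
    (hcase :
      ((∀ s ∈ object_lines, ((object_lines.getD 0 "").toList).length ≤ s.toList.length) ∧
        (((object_lines.getD 0 "").toList).length = 0 ∨
         grid_lines.length < object_lines.length ∨
         ((grid_lines.getD 0 "").toList).length < ((object_lines.getD 0 "").toList).length ∨
         (∀ s ∈ grid_lines, ((grid_lines.getD 0 "").toList).length ≤ s.toList.length)))
      ∨ (1 ≤ ((object_lines.getD 0 "").toList).length ∧
         (object_lines.getD 0 "").toList.getD 0 '.' ≠ '.' ∧
         (∀ s ∈ grid_lines, '.' ∉ s.toList) ∧
         (∀ s ∈ grid_lines,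
           ((grid_lines.getD 0 "").toList).length + 1 - ((object_lines.getD 0 "").toList).length
             ≤ s.toList.length))
      ∨ ((∀ s ∈ grid_lines, ∀ c ∈ s.toList, c = '.') ∧
         (∀ s ∈ grid_lines, ((grid_lines.getD 0 "").toList).length ≤ s.toList.length))) :
    ((List.range object_lines.length).all fun k =>
        (List.range (object_lines.getD 0 "").toList.length).all fun l =>
          !((grid_lines.getD (i + k) "").toList.getD (j + l) '.' != '.' &&
              (object_lines.getD k "").toList.getD l '.' != '.')) =
      ((List.range object_lines.length).all fun k =>
        (List.map (fun r => pvRowBits (List.take (grid_lines.getD 0 "").toList.length r.toList)) grid_lines).getD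
                (i + k) 0 >>> j &&&
            (List.map (fun r => pvRowBits (List.take (object_lines.getD 0 "").toList.length r.toList))
                  object_lines).getD k 0 == 0) := by
  rcases hcase with ⟨hol, _⟩ | ⟨how, h00, hdf, hln⟩ | ⟨hdots, _⟩
  · -- class 1: object rectangle-covered; generic row-by-row bitmask argument
    apply pv_all_congr_mem
    intro k hk
    rw [List.mem_range] at hk
    rw [pv_getD_map_rowBits, pv_getD_map_rowBits]
    have hmem : object_lines.getD k "" ∈ object_lines := by
      rw [List.getD_eq_getElem?_getD, List.getElem?_eq_getElem hk]
      exact List.getElem_mem hk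
    exact (pv_row_eq ((object_lines.getD k "").toList) ((grid_lines.getD (i + k) "").toList)
        ((object_lines.getD 0 "").toList.length) ((grid_lines.getD 0 "").toList.length) j
        (hol _ hmem) (by omega)).symm
  · -- class 2: dot-free grid, blocked first object cell: both sides are false
    have hoh : 0 < object_lines.length := List.length_pos_of_ne_nil ho
    have hilt : i < grid_lines.length := by omega
    have hgmem : grid_lines.getD i "" ∈ grid_lines := by
      rw [List.getD_eq_getElem?_getD, List.getElem?_eq_getElem hilt]
      exact List.getElem_mem hilt
    have hjlt : j < (grid_lines.getD i "").toList.length := by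
      have := hln _ hgmem; omega
    have hjgw : j < (grid_lines.getD 0 "").toList.length := by omega
    have hgne : (grid_lines.getD i "").toList.getD j '.' ≠ '.' :=
      pv_getD_mem_ne _ j hjlt (hdf _ hgmem)
    simp only [List.getD_eq_getElem?_getD] at hgne h00
    rw [List.all_eq_false.mpr ?_, Eq.comm, List.all_eq_false.mpr ?_]
    · exact ⟨0, by simpa using hoh, by
        rw [pv_getD_map_rowBits, pv_getD_map_rowBits]
        simp only [Nat.add_zero, beq_iff_eq]
        intro hzero
        have hbit := congrArg (fun n => n.testBit 0) hzero
        simp only [Nat.zero_testBit, Nat.testBit_and, Nat.testBit_shiftRight,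
          pvRowBits_testBit, Nat.add_zero] at hbit
        rw [pv_getD_take _ _ j hjgw, pv_getD_take _ _ 0 how] at hbit
        simp [hgne, h00] at hbit⟩
    · exact ⟨0, by simpa using hoh, by
        simp only [Nat.add_zero, List.all_eq_true, List.mem_range]
        intro hall
        have := hall 0 (by omega)
        simp only [Nat.add_zero] at this
        simp [hgne, h00] at this⟩
  · -- class 3: all-dot grid: both sides are true
    have hrowdot : ∀ r : Nat, ∀ c ∈ (grid_lines.getD r "").toList, c = '.' := by
      intro r c hc
      by_cases hr : r < grid_lines.length
      · have hmem : grid_lines.getD r "" ∈ grid_lines := by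
          rw [List.getD_eq_getElem?_getD, List.getElem?_eq_getElem hr]
          exact List.getElem_mem hr
        exact hdots _ hmem c hc
      · rw [List.getD_eq_getElem?_getD, List.getElem?_eq_none (by omega)] at hc
        simp at hc
    rw [List.all_eq_true.mpr ?_, List.all_eq_true.mpr ?_]
    · intro k _
      rw [pv_getD_map_rowBits, pv_getD_map_rowBits, beq_iff_eq, pv_shift_and_zero]
      intro t hc
      have hbit := hc.1
      have hdot : (List.take (grid_lines.getD 0 "").toList.length
          (grid_lines.getD (i + k) "").toList).getD (j + t) '.' = '.' :=
        pv_getD_dot _ _ (fun c hcm => hrowdot (i + k) c (List.take_subset _ _ hcm))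
      rw [pvRowBits_testBit, hdot] at hbit
      simp at hbit
    · intro k _
      simp only [List.all_eq_true, List.mem_range]
      intro l _
      have hdot : (grid_lines.getD (i + k) "").toList.getD (j + l) '.' = '.' :=
        pv_getD_dot _ _ (hrowdot (i + k))
      rw [hdot]
      simp

-- ===== VERDICT (by name: the statement is the Claim_ definition above) =====
theorem count_fits_spec : Claim_equal_count_fits := by
  intro object_lines grid_lines _ hpre
  obtain ⟨ho, hg, hcase⟩ := hpre
  show count_fits object_lines grid_lines = count_fits_alt object_lines grid_lines
  unfold count_fits count_fits_alt
  simp only []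
  apply PySem.List.foldl_congr_mem
  intro acc i hi
  rw [List.mem_range] at hi
  apply PySem.List.foldl_congr_mem
  intro acc2 j hj
  rw [List.mem_range] at hj
  have hc := pv_cond_eq object_lines grid_lines i j ho hg hi hj hcase
  rw [hc]
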